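-- pv_equiv track=rewrite | github.com/MrBrantCode/unitest_baseline | mut_generate/mist_train_cf/cf_77660/solution.py | convert_to_uppercase_and_count
-- ===== SOURCE A (Python) =====
-- def convert_to_uppercase_and_count(s):
--     count = 0
--     uppercase_s = ''
--
--     for char in s:
--         if 97 <= ord(char) <= 122:  # ASCII values for 'a' to 'z'
--             uppercase_s += chr(ord(char) - 32)  # ASCII values for 'A' to 'Z'
--             count += 1
--         else:
--             uppercase_s += char
--
--     return uppercase_s, count
-- ===== SOURCE B (Python) =====
-- def convert_to_uppercase_and_count(s):
--     # Divide and conquer: split the input in half, recurse, and combine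
--     # the two uppercased halves and their counts.
--     n = len(s)
--     if n == 0:
--         return '', 0
--     if n == 1:
--         c = s[0]
--         o = ord(c)
--         if 97 <= o <= 122:
--             return chr(o - 32), 1
--         return c, 0
--     m = n // 2
--     left, x = convert_to_uppercase_and_count(s[:m])
--     right, y = convert_to_uppercase_and_count(s[m:])
--     return left + right, x + y
-- ===== Notes on version B (the rewrite author's own statement) =====
-- stated objective: alternative
-- what changed: Replaces A's single left-to-right loop with accumulator state by a divide-and-conquer recursion: split the input at the midpoint, recurse on each half, and combine the uppercased halves and their counts.
import Mathlib
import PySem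

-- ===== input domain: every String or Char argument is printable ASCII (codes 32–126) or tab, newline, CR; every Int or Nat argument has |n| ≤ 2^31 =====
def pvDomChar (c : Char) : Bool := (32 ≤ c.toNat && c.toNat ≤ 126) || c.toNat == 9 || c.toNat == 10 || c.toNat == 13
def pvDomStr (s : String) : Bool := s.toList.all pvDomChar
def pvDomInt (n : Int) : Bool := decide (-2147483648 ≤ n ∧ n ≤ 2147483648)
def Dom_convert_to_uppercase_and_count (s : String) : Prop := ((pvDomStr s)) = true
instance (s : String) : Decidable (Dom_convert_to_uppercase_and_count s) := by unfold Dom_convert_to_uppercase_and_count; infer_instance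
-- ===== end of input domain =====

-- B changes the decomposition (divide-and-conquer recursion instead of A's single accumulator loop); same values, not claimed faster.

-- ===== PORT A =====
-- A: one loop, accumulating (uppercase_s, count); string += ported as list append, mk at return.
def convert_to_uppercase_and_count (s : String) : String × Int :=
  let r := s.toList.foldl
    (fun (acc : List Char × Int) c =>
      if 97 ≤ c.toNat ∧ c.toNat ≤ 122 then
        (acc.1 ++ [Char.ofNat (c.toNat - 32)], acc.2 + 1)
      else
        (acc.1 ++ [c], acc.2))
    ([], 0)
  (String.mk r.1, r.2)

-- ===== PORT B =====
-- B: divide and conquer — split at n // 2, recurse on both halves, concatenate results and add counts.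
def pvGoB : List Char → List Char × Int
  | [] => ([], 0)
  | [c] =>
    if 97 ≤ c.toNat ∧ c.toNat ≤ 122 then ([Char.ofNat (c.toNat - 32)], 1) else ([c], 0)
  | c1 :: c2 :: rest =>
    let l := c1 :: c2 :: rest
    let m := l.length / 2
    match pvGoB (l.take m), pvGoB (l.drop m) with
    | (left, x), (right, y) => (left ++ right, x + y)
  termination_by l => l.length
  decreasing_by
    · simp [List.length_take]; omega
    · simp [List.length_drop]; omega

def convert_to_uppercase_and_count_alt (s : String) : String × Int :=
  let r := pvGoB s.toList
  (String.mk r.1, r.2)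

-- ===== PRECONDITION & SPEC =====
def Spec_convert_to_uppercase_and_count (s : String) (out : String × Int) : Prop := out = convert_to_uppercase_and_count_alt s
instance (s : String) (out : String × Int) : Decidable (Spec_convert_to_uppercase_and_count s out) := by unfold Spec_convert_to_uppercase_and_count; infer_instance

-- ===== CLAIM (what is proved, stated in full; the proofs are below) =====
def Claim_equal_convert_to_uppercase_and_count : Prop := ∀ (s : String), Dom_convert_to_uppercase_and_count s → Spec_convert_to_uppercase_and_count s (convert_to_uppercase_and_count s)

-- ===== LEMMAS AND PROOFS =====

-- A's loop computes the map/filter closed form.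
theorem pvFoldl_char (l : List Char) (acc : List Char) (n : Int) :
    l.foldl
      (fun (acc : List Char × Int) c =>
        if 97 ≤ c.toNat ∧ c.toNat ≤ 122 then
          (acc.1 ++ [Char.ofNat (c.toNat - 32)], acc.2 + 1)
        else
          (acc.1 ++ [c], acc.2))
      (acc, n)
    = (acc ++ l.map (fun c => if 97 ≤ c.toNat ∧ c.toNat ≤ 122 then Char.ofNat (c.toNat - 32) else c),
       n + (l.filter (fun c => decide (97 ≤ c.toNat ∧ c.toNat ≤ 122))).length) := by
  induction l generalizing acc n with
  | nil => simp
  | cons c cs ih =>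
    by_cases h : 97 ≤ c.toNat ∧ c.toNat ≤ 122 <;>
      simp [List.foldl, h, ih] <;> omega

-- B's divide-and-conquer recursion computes the same closed form.
theorem pvGoB_eq (l : List Char) :
    pvGoB l
    = (l.map (fun c => if 97 ≤ c.toNat ∧ c.toNat ≤ 122 then Char.ofNat (c.toNat - 32) else c),
       ((l.filter (fun c => decide (97 ≤ c.toNat ∧ c.toNat ≤ 122))).length : Int)) := by
  fun_induction pvGoB l with
  | case1 => simp
  | case2 c h => simp [h]
  | case3 c h => simp [h]
  | case4 =>
    rename_i hdrop htake ihtake ihdrop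
    rw [ihtake] at htake
    rw [ihdrop] at hdrop
    injection htake with h1 h2
    injection hdrop with h3 h4
    subst h1 h2 h3 h4
    refine Prod.ext ?_ ?_
    · show _ ++ _ = _
      rw [← List.map_append, List.take_append_drop]
    · show ((_ : ℕ) : ℤ) + ((_ : ℕ) : ℤ) = _
      rw [← Nat.cast_add, ← List.length_append, ← List.filter_append, List.take_append_drop]

-- ===== VERDICT (by name: the statement is the Claim_ definition above) =====
theorem convert_to_uppercase_and_count_spec : Claim_equal_convert_to_uppercase_and_count := by
  intro s _
  unfold Spec_convert_to_uppercase_and_count convert_to_uppercase_and_count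
    convert_to_uppercase_and_count_alt
  simp [pvFoldl_char, pvGoB_eq]
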